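-- pv_equiv track=rewrite | github.com/nkawarai/keibaTools | 点数計算/BakenCombinationCalculator.py | calculate_3renpuku_formation_points
-- ===== SOURCE A (Python) =====
-- def calculate_3renpuku_formation_points(line1, line2, line3):
--     """
--     3連複フォーメーションの買い目点数を計算する
--     :param line1: 軸1の馬番号リスト
--     :param line2: 軸2の馬番号リスト
--     :param line3: 軸3の馬番号リスト
--     :return: 買い目の点数
--     """
--     combinations = []
--     for horse1 in line1:
--         for horse2 in line2:
--             if horse1 == horse2:  # 軸1と軸2で同じ馬を避ける
--                 continue
--             for horse3 in line3:
--                 if horse3 in (horse1, horse2):  # 同じ馬を避ける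
--                     continue
--                 combinations.append(sorted([horse1, horse2, horse3]))
--
--     # 重複を削除
--     distinct_array = list(set(tuple(sublist) for sublist in combinations))
--     return len(distinct_array)
-- ===== SOURCE B (Python) =====
-- def calculate_3renpuku_formation_points(line1, line2, line3):
--     """
--     3連複フォーメーションの買い目点数を計算する
--     Alternative: enumerate each candidate unordered triple of the sorted distinct
--     universe once, and count it if some assignment of its three horses to the
--     three axes (a system of distinct representatives) is possible.
--     """
--     s1, s2, s3 = set(line1), set(line2), set(line3)
--     u = sorted(s1 | s2 | s3)
--     count = 0
--     suffix = u
--     while len(suffix) >= 3: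
--         x, rest = suffix[0], suffix[1:]
--         pair_rest = rest
--         while len(pair_rest) >= 2:
--             y, tail = pair_rest[0], pair_rest[1:]
--             for z in tail:
--                 if ((x in s1 and y in s2 and z in s3) or
--                         (x in s1 and z in s2 and y in s3) or
--                         (y in s1 and x in s2 and z in s3) or
--                         (y in s1 and z in s2 and x in s3) or
--                         (z in s1 and x in s2 and y in s3) or
--                         (z in s1 and y in s2 and x in s3)):
--                     count += 1
--             pair_rest = tail
--         suffix = rest
--     return count
-- ===== Notes on version B (the rewrite author's own statement) =====
-- stated objective: alternative
-- what changed: Instead of enumerating all ordered (h1,h2,h3) triples, sorting each and deduplicating via a set, B enumerates each candidate unordered triple of the sorted distinct universe exactly once and counts it if one of its 6 assignments to the three axes is feasible (system of distinct representatives), so no dedup structure is needed.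
import Mathlib
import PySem

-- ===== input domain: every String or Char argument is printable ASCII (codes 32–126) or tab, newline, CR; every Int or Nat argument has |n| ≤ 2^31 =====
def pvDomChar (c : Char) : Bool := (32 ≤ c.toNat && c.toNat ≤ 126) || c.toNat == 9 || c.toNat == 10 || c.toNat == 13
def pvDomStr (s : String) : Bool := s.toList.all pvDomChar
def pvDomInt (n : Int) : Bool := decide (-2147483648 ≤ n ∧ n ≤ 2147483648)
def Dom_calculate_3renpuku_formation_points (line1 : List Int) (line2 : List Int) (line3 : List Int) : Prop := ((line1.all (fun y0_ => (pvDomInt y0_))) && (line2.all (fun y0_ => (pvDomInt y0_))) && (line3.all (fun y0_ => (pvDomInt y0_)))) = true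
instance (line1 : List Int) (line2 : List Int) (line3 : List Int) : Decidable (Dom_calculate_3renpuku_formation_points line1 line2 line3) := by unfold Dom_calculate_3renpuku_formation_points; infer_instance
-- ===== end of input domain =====

-- B replaces 'all ordered triples, sort each, dedup via a set' by 'enumerate each
-- unordered triple of the sorted distinct universe once; count it if one of its 6
-- axis assignments is feasible' (objective: alternative algorithm, no dedup needed).

-- ===== PORT A =====
-- accumulate sorted([h1,h2,h3]) (a 3-element List Int stands for the Python tuple) over the three nested loops
def pvCombA (line1 : List Int) (line2 : List Int) (line3 : List Int) : List (List Int) :=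
  line1.foldl (fun acc1 h1 =>
    line2.foldl (fun acc2 h2 =>
      if h1 = h2 then acc2
      else line3.foldl (fun acc3 h3 =>
        if h3 = h1 ∨ h3 = h2 then acc3
        else acc3 ++ [PySem.List.sorted [h1, h2, h3] (fun v => v) false]) acc2) acc1) []

def calculate_3renpuku_formation_points (line1 : List Int) (line2 : List Int) (line3 : List Int) : Int :=
  -- len(list(set(...))): only the SIZE of the set is used, so hash order does not matter
  ((PySem.Set.ofList (pvCombA line1 line2 line3)).length : Int)

-- ===== PORT B =====
-- the 6-way feasibility test of Source B, disjuncts in the same order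
def pvFeas (s1 s2 s3 : PySem.Set Int) (x y z : Int) : Bool :=
  (PySem.Set.contains s1 x && PySem.Set.contains s2 y && PySem.Set.contains s3 z) ||
  (PySem.Set.contains s1 x && PySem.Set.contains s2 z && PySem.Set.contains s3 y) ||
  (PySem.Set.contains s1 y && PySem.Set.contains s2 x && PySem.Set.contains s3 z) ||
  (PySem.Set.contains s1 y && PySem.Set.contains s2 z && PySem.Set.contains s3 x) ||
  (PySem.Set.contains s1 z && PySem.Set.contains s2 x && PySem.Set.contains s3 y) ||
  (PySem.Set.contains s1 z && PySem.Set.contains s2 y && PySem.Set.contains s3 x)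

-- 'for z in tail: if feasible: count += 1'
def pvInner (s1 s2 s3 : PySem.Set Int) (x y : Int) (tail : List Int) (c : Int) : Int :=
  tail.foldl (fun c z => if pvFeas s1 s2 s3 x y z then c + 1 else c) c

-- 'while len(pair_rest) >= 2: y, tail = pair_rest[0], pair_rest[1:]; …'
def pvMid (s1 s2 s3 : PySem.Set Int) (x : Int) : List Int → Int → Int
  | [], c => c
  | [_], c => c
  | y :: z :: t, c => pvMid s1 s2 s3 x (z :: t) (pvInner s1 s2 s3 x y (z :: t) c)

-- 'while len(suffix) >= 3: x, rest = suffix[0], suffix[1:]; …'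
def pvOut (s1 s2 s3 : PySem.Set Int) : List Int → Int → Int
  | [], c => c
  | [_], c => c
  | [_, _], c => c
  | x :: y :: z :: t, c => pvOut s1 s2 s3 (y :: z :: t) (pvMid s1 s2 s3 x (y :: z :: t) c)

def calculate_3renpuku_formation_points_alt (line1 : List Int) (line2 : List Int) (line3 : List Int) : Int :=
  let s1 := PySem.Set.ofList line1
  let s2 := PySem.Set.ofList line2
  let s3 := PySem.Set.ofList line3
  let u := PySem.List.sorted (PySem.Set.union (PySem.Set.union s1 s2) s3) (fun v => v) false
  pvOut s1 s2 s3 u 0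

-- ===== PRECONDITION & SPEC =====
def Spec_calculate_3renpuku_formation_points (line1 : List Int) (line2 : List Int) (line3 : List Int) (out : Int) : Prop := out = calculate_3renpuku_formation_points_alt line1 line2 line3
instance (line1 : List Int) (line2 : List Int) (line3 : List Int) (out : Int) : Decidable (Spec_calculate_3renpuku_formation_points line1 line2 line3 out) := by unfold Spec_calculate_3renpuku_formation_points; infer_instance

-- ===== CLAIM (what is proved, stated in full; the proofs are below) =====
def Claim_equal_calculate_3renpuku_formation_points : Prop := ∀ (line1 : List Int) (line2 : List Int) (line3 : List Int), Dom_calculate_3renpuku_formation_points line1 line2 line3 → Spec_calculate_3renpuku_formation_points line1 line2 line3 (calculate_3renpuku_formation_points line1 line2 line3)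

-- ===== LEMMAS AND PROOFS =====

-- the list of index-increasing pairs / triples of a list (proof-side view of B's loops)
def pvPairsL : List Int → List (Int × Int)
  | [] => []
  | y :: t => t.map (fun z => (y, z)) ++ pvPairsL t

def pvTriplesL : List Int → List (Int × Int × Int)
  | [] => []
  | x :: r => (pvPairsL r).map (fun p => (x, p.1, p.2)) ++ pvTriplesL r

theorem pvInner_eq (s1 s2 s3 : PySem.Set Int) (x y : Int) (tail : List Int) (c : Int) :
    pvInner s1 s2 s3 x y tail c = c + (tail.countP (fun z => pvFeas s1 s2 s3 x y z) : Int) := by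
  simpa [pvInner] using PySem.List.foldl_if_add_one (l := tail) (p := fun z => pvFeas s1 s2 s3 x y z) (a := c)

theorem pvMid_eq (s1 s2 s3 : PySem.Set Int) (x : Int) (pr : List Int) (c : Int) :
    pvMid s1 s2 s3 x pr c = c + ((pvPairsL pr).countP (fun p => pvFeas s1 s2 s3 x p.1 p.2) : Int) := by
  induction pr generalizing c with
  | nil => simp [pvMid, pvPairsL]
  | cons y t ih =>
    cases t with
    | nil => simp [pvMid, pvPairsL]
    | cons z t' =>
      rw [pvMid, ih, pvInner_eq]
      simp only [pvPairsL, List.countP_append, List.countP_map, Function.comp_def]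
      push_cast
      ring

theorem pvOut_eq (s1 s2 s3 : PySem.Set Int) (u : List Int) (c : Int) :
    pvOut s1 s2 s3 u c = c + ((pvTriplesL u).countP (fun t => pvFeas s1 s2 s3 t.1 t.2.1 t.2.2) : Int) := by
  induction u generalizing c with
  | nil => simp [pvOut, pvTriplesL]
  | cons x r ih =>
    match r with
    | [] => simp [pvOut, pvTriplesL, pvPairsL]
    | [y] => simp [pvOut, pvTriplesL, pvPairsL]
    | y :: z :: t =>
      rw [pvOut, ih, pvMid_eq]
      simp only [pvTriplesL, List.countP_append, List.countP_map, Function.comp_def]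
      push_cast
      ring


-- a v-increasing list has no duplicate pairs / triples; membership is characterized by order
theorem pvNotMem_of_forall_lt {a : Int} {t : List Int} (h : ∀ b ∈ t, a < b) : a ∉ t := by
  intro hm; exact absurd (h a hm) (lt_irrefl a)

theorem pvFst_mem_pvPairsL {p : Int × Int} {l : List Int} (h : p ∈ pvPairsL l) : p.1 ∈ l := by
  induction l with
  | nil => simp [pvPairsL] at h
  | cons a t ih =>
    simp only [pvPairsL, List.mem_append, List.mem_map] at h
    rcases h with ⟨w, _, rfl⟩ | h
    · simp
    · exact List.mem_cons_of_mem _ (ih h)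

theorem pvFst_mem_pvTriplesL {p : Int × Int × Int} {l : List Int} (h : p ∈ pvTriplesL l) : p.1 ∈ l := by
  induction l with
  | nil => simp [pvTriplesL] at h
  | cons a t ih =>
    simp only [pvTriplesL, List.mem_append, List.mem_map] at h
    rcases h with ⟨w, _, rfl⟩ | h
    · simp
    · exact List.mem_cons_of_mem _ (ih h)

theorem mem_pvPairsL {l : List Int} (hl : l.Pairwise (· < ·)) (y z : Int) :
    (y, z) ∈ pvPairsL l ↔ y ∈ l ∧ z ∈ l ∧ y < z := by
  induction l with
  | nil => simp [pvPairsL]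
  | cons a t ih =>
    rcases List.pairwise_cons.mp hl with ⟨ha, ht⟩
    simp only [pvPairsL, List.mem_append, List.mem_map, List.mem_cons]
    constructor
    · rintro (⟨w, hw, he⟩ | h)
      · obtain ⟨rfl, rfl⟩ : a = y ∧ w = z := by simpa [Prod.ext_iff, eq_comm] using he
        exact ⟨Or.inl rfl, Or.inr hw, ha _ hw⟩
      · rcases (ih ht).mp h with ⟨hy, hz, hlt⟩
        exact ⟨Or.inr hy, Or.inr hz, hlt⟩
    · rintro ⟨hy | hy, hz | hz, hlt⟩
      · omega
      · exact Or.inl ⟨z, hz, by simp [hy]⟩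
      · exact absurd (ha y hy) (by omega)
      · exact Or.inr ((ih ht).mpr ⟨hy, hz, hlt⟩)

theorem mem_pvTriplesL {l : List Int} (hl : l.Pairwise (· < ·)) (x y z : Int) :
    (x, y, z) ∈ pvTriplesL l ↔ x ∈ l ∧ y ∈ l ∧ z ∈ l ∧ x < y ∧ y < z := by
  induction l with
  | nil => simp [pvTriplesL]
  | cons a t ih =>
    rcases List.pairwise_cons.mp hl with ⟨ha, ht⟩
    simp only [pvTriplesL, List.mem_append, List.mem_map, List.mem_cons]
    constructor
    · rintro (⟨w, hw, he⟩ | h)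
      · obtain ⟨rfl, rfl, rfl⟩ : a = x ∧ w.1 = y ∧ w.2 = z := by
          simpa [Prod.ext_iff, eq_comm] using he
        rcases (mem_pvPairsL ht _ _).mp (by simpa using hw) with ⟨h1, h2, h3⟩
        exact ⟨Or.inl rfl, Or.inr h1, Or.inr h2, ha _ h1, h3⟩
      · rcases (ih ht).mp h with ⟨hx, hy, hz, h1, h2⟩
        exact ⟨Or.inr hx, Or.inr hy, Or.inr hz, h1, h2⟩
    · rintro ⟨hx | hx, hy | hy, hz | hz, h1, h2⟩
      · omega
      · omega
      · exact absurd (ha y hy) (by omega)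
      · exact Or.inl ⟨(y, z), (mem_pvPairsL ht _ _).mpr ⟨hy, hz, h2⟩, by simp [hx]⟩
      · exact absurd (ha x hx) (by omega)
      · exact absurd (ha x hx) (by omega)
      · exact absurd (ha x hx) (by omega)
      · exact Or.inr ((ih ht).mpr ⟨hx, hy, hz, h1, h2⟩)

theorem nodup_pvPairsL {l : List Int} (hl : l.Pairwise (· < ·)) : (pvPairsL l).Nodup := by
  induction l with
  | nil => simp [pvPairsL]
  | cons a t ih =>
    rcases List.pairwise_cons.mp hl with ⟨ha, ht⟩
    have hnt : t.Nodup := ht.imp (fun h => ne_of_lt h)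
    refine List.nodup_append.mpr ⟨?_, ih ht, ?_⟩
    · exact hnt.map (fun u v h => by simpa using congrArg Prod.snd h)
    · intro p hp q hq he
      rcases List.mem_map.mp hp with ⟨w, _, rfl⟩
      have h1 : q.1 ∈ t := pvFst_mem_pvPairsL hq
      rw [← he] at h1
      exact pvNotMem_of_forall_lt ha (by simpa using h1)

theorem nodup_pvTriplesL {l : List Int} (hl : l.Pairwise (· < ·)) : (pvTriplesL l).Nodup := by
  induction l with
  | nil => simp [pvTriplesL]
  | cons a t ih =>
    rcases List.pairwise_cons.mp hl with ⟨ha, ht⟩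
    refine List.nodup_append.mpr ⟨?_, ih ht, ?_⟩
    · exact (nodup_pvPairsL ht).map (fun u v h => by
        simpa [Prod.ext_iff] using congrArg Prod.snd h)
    · intro p hp q hq he
      rcases List.mem_map.mp hp with ⟨w, _, rfl⟩
      have h1 : q.1 ∈ t := pvFst_mem_pvTriplesL hq
      rw [← he] at h1
      exact pvNotMem_of_forall_lt ha (by simpa using h1)

-- sorting a duplicate-free list by the identity key is strictly increasing
theorem pvSorted_lt (l : List Int) (h : l.Nodup) :
    (PySem.List.sorted l (fun v => v) false).Pairwise (· < ·) := by
  have hle := PySem.List.sorted_pairwise (xs := l) (key := fun v => v)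
  have hne : (PySem.List.sorted l (fun v => v) false).Nodup :=
    (PySem.List.sorted_perm (xs := l) (key := fun v => v) (rev := false)).nodup_iff.mpr h
  exact (hle.and hne).imp (fun h => lt_of_le_of_ne h.1 h.2)

-- A's nested loops as one nested flatMap
theorem pvCombA_eq (l1 l2 l3 : List Int) :
    pvCombA l1 l2 l3 =
      l1.flatMap (fun h1 => l2.flatMap (fun h2 =>
        if h1 = h2 then []
        else (l3.filter (fun h3 => decide (¬(h3 = h1 ∨ h3 = h2)))).map
          (fun h3 => PySem.List.sorted [h1, h2, h3] (fun v => v) false))) := by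
  unfold pvCombA
  rw [show (fun (acc1 : List (List Int)) (h1 : Int) =>
      l2.foldl (fun acc2 h2 =>
        if h1 = h2 then acc2
        else l3.foldl (fun acc3 h3 =>
          if h3 = h1 ∨ h3 = h2 then acc3
          else acc3 ++ [PySem.List.sorted [h1, h2, h3] (fun v => v) false]) acc2) acc1) =
    (fun acc1 h1 => acc1 ++ l2.flatMap (fun h2 =>
        if h1 = h2 then []
        else (l3.filter (fun h3 => decide (¬(h3 = h1 ∨ h3 = h2)))).map
          (fun h3 => PySem.List.sorted [h1, h2, h3] (fun v => v) false))) from ?_]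
  · exact (PySem.List.foldl_append_eq_flatMap _ _ _)
  · funext acc1 h1
    rw [show (fun (acc2 : List (List Int)) (h2 : Int) =>
        if h1 = h2 then acc2
        else l3.foldl (fun acc3 h3 =>
          if h3 = h1 ∨ h3 = h2 then acc3
          else acc3 ++ [PySem.List.sorted [h1, h2, h3] (fun v => v) false]) acc2) =
      (fun acc2 h2 => acc2 ++ (if h1 = h2 then []
        else (l3.filter (fun h3 => decide (¬(h3 = h1 ∨ h3 = h2)))).map
          (fun h3 => PySem.List.sorted [h1, h2, h3] (fun v => v) false))) from ?_]
    · exact (PySem.List.foldl_append_eq_flatMap _ _ _)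
    · funext acc2 h2
      by_cases h : h1 = h2
      · simp [h]
      · simp only [h, if_false]
        rw [show (fun (acc3 : List (List Int)) (h3 : Int) =>
            if h3 = h1 ∨ h3 = h2 then acc3
            else acc3 ++ [PySem.List.sorted [h1, h2, h3] (fun v => v) false]) =
          (fun acc3 h3 => if ¬(h3 = h1 ∨ h3 = h2)
            then acc3 ++ [PySem.List.sorted [h1, h2, h3] (fun v => v) false] else acc3) from ?_]
        · exact PySem.List.foldl_append_ite (fun h3 => ¬(h3 = h1 ∨ h3 = h2))
            (fun h3 => PySem.List.sorted [h1, h2, h3] (fun v => v) false) l3 acc2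
        · funext acc3 h3
          by_cases hh : h3 = h1 ∨ h3 = h2 <;> simp [hh]

theorem mem_pvCombA (l1 l2 l3 : List Int) (L : List Int) :
    L ∈ pvCombA l1 l2 l3 ↔
      ∃ h1 ∈ l1, ∃ h2 ∈ l2, ∃ h3 ∈ l3, h1 ≠ h2 ∧ h3 ≠ h1 ∧ h3 ≠ h2 ∧
        L = PySem.List.sorted [h1, h2, h3] (fun v => v) false := by
  rw [pvCombA_eq]
  simp only [List.mem_flatMap]
  constructor
  · rintro ⟨h1, hm1, h2, hm2, hL⟩
    by_cases h : h1 = h2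
    · rw [if_pos h] at hL
      simp at hL
    · rw [if_neg h] at hL
      rcases List.mem_map.mp hL with ⟨h3, hm3, rfl⟩
      rcases List.mem_filter.mp hm3 with ⟨hm3, hcond⟩
      have hcond' : ¬(h3 = h1 ∨ h3 = h2) := by simpa using hcond
      exact ⟨h1, hm1, h2, hm2, h3, hm3, h, fun e => hcond' (Or.inl e), fun e => hcond' (Or.inr e), rfl⟩
  · rintro ⟨h1, hm1, h2, hm2, h3, hm3, hne12, hne31, hne32, rfl⟩
    refine ⟨h1, hm1, h2, hm2, ?_⟩
    rw [if_neg hne12]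
    exact List.mem_map.mpr ⟨h3, List.mem_filter.mpr ⟨hm3, by simp [hne31, hne32]⟩, rfl⟩

-- small explicit permutations of a 3-element list
theorem pvPerm_acb (a b c : Int) : ([a, b, c] : List Int).Perm [a, c, b] :=
  List.Perm.cons _ (List.Perm.swap c b [])
theorem pvPerm_bac (a b c : Int) : ([a, b, c] : List Int).Perm [b, a, c] :=
  List.Perm.swap b a [c]
theorem pvPerm_bca (a b c : Int) : ([a, b, c] : List Int).Perm [b, c, a] :=
  (pvPerm_bac a b c).trans (pvPerm_acb b a c)
theorem pvPerm_cab (a b c : Int) : ([a, b, c] : List Int).Perm [c, a, b] :=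
  (pvPerm_acb a b c).trans (pvPerm_bac a c b)
theorem pvPerm_cba (a b c : Int) : ([a, b, c] : List Int).Perm [c, b, a] :=
  (pvPerm_cab a b c).trans (pvPerm_acb c a b)

theorem pvPerm3_cases {h1 h2 h3 x y z : Int}
    (hp : ([h1, h2, h3] : List Int).Perm [x, y, z])
    (hxy : x ≠ y) (hxz : x ≠ z) (hyz : y ≠ z) :
    (h1 = x ∧ h2 = y ∧ h3 = z) ∨ (h1 = x ∧ h2 = z ∧ h3 = y) ∨
    (h1 = y ∧ h2 = x ∧ h3 = z) ∨ (h1 = y ∧ h2 = z ∧ h3 = x) ∨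
    (h1 = z ∧ h2 = x ∧ h3 = y) ∨ (h1 = z ∧ h2 = y ∧ h3 = x) := by
  have hn : ([h1, h2, h3] : List Int).Nodup :=
    hp.nodup_iff.mpr (by simp [hxy, hxz, hyz])
  have hn' : (¬h1 = h2 ∧ ¬h1 = h3) ∧ ¬h2 = h3 := by simpa using hn
  have m1 : h1 = x ∨ h1 = y ∨ h1 = z := by simpa using hp.subset (by simp : h1 ∈ [h1, h2, h3])
  have m2 : h2 = x ∨ h2 = y ∨ h2 = z := by simpa using hp.subset (by simp : h2 ∈ [h1, h2, h3])
  have m3 : h3 = x ∨ h3 = y ∨ h3 = z := by simpa using hp.subset (by simp : h3 ∈ [h1, h2, h3])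
  rcases m1 with e1|e1|e1 <;> rcases m2 with e2|e2|e2 <;> rcases m3 with e3|e3|e3 <;>
    first
      | exact Or.inl ⟨e1, e2, e3⟩
      | exact Or.inr (Or.inl ⟨e1, e2, e3⟩)
      | exact Or.inr (Or.inr (Or.inl ⟨e1, e2, e3⟩))
      | exact Or.inr (Or.inr (Or.inr (Or.inl ⟨e1, e2, e3⟩)))
      | exact Or.inr (Or.inr (Or.inr (Or.inr (Or.inl ⟨e1, e2, e3⟩))))
      | exact Or.inr (Or.inr (Or.inr (Or.inr (Or.inr ⟨e1, e2, e3⟩))))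
      | exact absurd (e1.trans e2.symm) hn'.1.1
      | exact absurd (e1.trans e3.symm) hn'.1.2
      | exact absurd (e2.trans e3.symm) hn'.2

-- the central bijection, membership level: A's accumulated triple lists are exactly
-- the feasible strictly increasing triples of the universe, written as 3-lists
theorem pvKey_iff (l1 l2 l3 u : List Int)
    (hu_mem : ∀ v : Int, v ∈ u ↔ (v ∈ l1 ∨ v ∈ l2 ∨ v ∈ l3))
    (hu_lt : u.Pairwise (· < ·)) (L : List Int) :
    L ∈ pvCombA l1 l2 l3 ↔
      ∃ t ∈ pvTriplesL u,
        pvFeas (PySem.Set.ofList l1) (PySem.Set.ofList l2) (PySem.Set.ofList l3)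
          t.1 t.2.1 t.2.2 = true ∧ [t.1, t.2.1, t.2.2] = L := by
  have hfe : ∀ a b c : Int,
      pvFeas (PySem.Set.ofList l1) (PySem.Set.ofList l2) (PySem.Set.ofList l3) a b c = true ↔
      ((a ∈ l1 ∧ b ∈ l2 ∧ c ∈ l3) ∨ (a ∈ l1 ∧ c ∈ l2 ∧ b ∈ l3) ∨
       (b ∈ l1 ∧ a ∈ l2 ∧ c ∈ l3) ∨ (b ∈ l1 ∧ c ∈ l2 ∧ a ∈ l3) ∨
       (c ∈ l1 ∧ a ∈ l2 ∧ b ∈ l3) ∨ (c ∈ l1 ∧ b ∈ l2 ∧ a ∈ l3)) := by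
    intro a b c
    simp only [pvFeas, Bool.or_eq_true, Bool.and_eq_true, PySem.Set.contains_iff,
      PySem.Set.mem_ofList]
    simp only [and_assoc, or_assoc]
  rw [mem_pvCombA]
  constructor
  · rintro ⟨h1, hm1, h2, hm2, h3, hm3, hne12, hne31, hne32, rfl⟩
    have hnd : ([h1, h2, h3] : List Int).Nodup := by
      simp only [List.nodup_cons, List.mem_cons, List.not_mem_nil, List.nodup_nil,
        or_false, not_or, and_true]
      refine ⟨⟨hne12, ?_⟩, ?_, not_false⟩ <;> omega
    have hperm : (PySem.List.sorted [h1, h2, h3] (fun v => v) false).Perm [h1, h2, h3] :=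
      PySem.List.sorted_perm _ _ _
    have hlt : (PySem.List.sorted [h1, h2, h3] (fun v => v) false).Pairwise (· < ·) :=
      pvSorted_lt _ hnd
    have hlen : (PySem.List.sorted [h1, h2, h3] (fun v => v) false).length = 3 := by
      simp [hperm.length_eq]
    obtain ⟨x, y, z, hS⟩ : ∃ x y z, PySem.List.sorted [h1, h2, h3] (fun v => v) false = [x, y, z] := by
      rcases hs : PySem.List.sorted [h1, h2, h3] (fun v => v) false with _ | ⟨x, _ | ⟨y, _ | ⟨z, _ | _⟩⟩⟩ <;>
        simp [hs] at hlen ⊢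
    rw [hS] at hperm hlt
    have hxy : x < y := by
      rcases List.pairwise_cons.mp hlt with ⟨h, _⟩; exact h y (by simp)
    have hyz : y < z := by
      rcases List.pairwise_cons.mp hlt with ⟨_, h⟩
      rcases List.pairwise_cons.mp h with ⟨h, _⟩; exact h z (by simp)
    have hp' : ([h1, h2, h3] : List Int).Perm [x, y, z] := hperm.symm
    have hc := pvPerm3_cases hp' (by omega) (by omega) (by omega)
    have hsub : ∀ v, v ∈ ([x, y, z] : List Int) → v ∈ u := by
      intro v hv
      have hv' : v ∈ ([h1, h2, h3] : List Int) := hp'.symm.subset hv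
      rw [hu_mem]
      rcases (by simpa using hv' : v = h1 ∨ v = h2 ∨ v = h3) with rfl | rfl | rfl
      · exact Or.inl hm1
      · exact Or.inr (Or.inl hm2)
      · exact Or.inr (Or.inr hm3)
    refine ⟨(x, y, z), (mem_pvTriplesL hu_lt x y z).mpr
      ⟨hsub x (by simp), hsub y (by simp), hsub z (by simp), hxy, hyz⟩, ?_, by rw [hS]⟩
    rw [hfe]
    rcases hc with ⟨e1, e2, e3⟩ | ⟨e1, e2, e3⟩ | ⟨e1, e2, e3⟩ | ⟨e1, e2, e3⟩ | ⟨e1, e2, e3⟩ | ⟨e1, e2, e3⟩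
    · exact Or.inl ⟨e1 ▸ hm1, e2 ▸ hm2, e3 ▸ hm3⟩
    · exact Or.inr (Or.inl ⟨e1 ▸ hm1, e2 ▸ hm2, e3 ▸ hm3⟩)
    · exact Or.inr (Or.inr (Or.inl ⟨e1 ▸ hm1, e2 ▸ hm2, e3 ▸ hm3⟩))
    · exact Or.inr (Or.inr (Or.inr (Or.inl ⟨e1 ▸ hm1, e2 ▸ hm2, e3 ▸ hm3⟩)))
    · exact Or.inr (Or.inr (Or.inr (Or.inr (Or.inl ⟨e1 ▸ hm1, e2 ▸ hm2, e3 ▸ hm3⟩))))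
    · exact Or.inr (Or.inr (Or.inr (Or.inr (Or.inr ⟨e1 ▸ hm1, e2 ▸ hm2, e3 ▸ hm3⟩))))
  · rintro ⟨⟨x, y, z⟩, hmem, hfeas, rfl⟩
    rcases (mem_pvTriplesL hu_lt x y z).mp hmem with ⟨hxu, hyu, hzu, hxy, hyz⟩
    have hlt : ([x, y, z] : List Int).Pairwise (· < ·) := by
      refine List.pairwise_cons.mpr ⟨?_, List.pairwise_cons.mpr ⟨?_, List.pairwise_singleton _ _⟩⟩
      · intro a ha
        rcases List.mem_cons.mp ha with rfl | ha
        · omega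
        · have := List.mem_singleton.mp ha; omega
      · intro a ha
        have := List.mem_singleton.mp ha; omega
    rcases (hfe x y z).mp hfeas with ⟨ha, hb, hc⟩ | ⟨ha, hb, hc⟩ | ⟨ha, hb, hc⟩ | ⟨ha, hb, hc⟩ | ⟨ha, hb, hc⟩ | ⟨ha, hb, hc⟩
    · exact ⟨x, ha, y, hb, z, hc, by omega, by omega, by omega,
        (PySem.List.sorted_eq_of_perm_of_pairwise_lt _ _ _ (List.Perm.refl _) hlt).symm⟩
    · exact ⟨x, ha, z, hb, y, hc, by omega, by omega, by omega,
        (PySem.List.sorted_eq_of_perm_of_pairwise_lt _ _ _ (pvPerm_acb x y z) hlt).symm⟩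
    · exact ⟨y, ha, x, hb, z, hc, by omega, by omega, by omega,
        (PySem.List.sorted_eq_of_perm_of_pairwise_lt _ _ _ (pvPerm_bac x y z) hlt).symm⟩
    · exact ⟨y, ha, z, hb, x, hc, by omega, by omega, by omega,
        (PySem.List.sorted_eq_of_perm_of_pairwise_lt _ _ _ (pvPerm_bca x y z) hlt).symm⟩
    · exact ⟨z, ha, x, hb, y, hc, by omega, by omega, by omega,
        (PySem.List.sorted_eq_of_perm_of_pairwise_lt _ _ _ (pvPerm_cab x y z) hlt).symm⟩
    · exact ⟨z, ha, y, hb, x, hc, by omega, by omega, by omega,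
        (PySem.List.sorted_eq_of_perm_of_pairwise_lt _ _ _ (pvPerm_cba x y z) hlt).symm⟩

-- ===== VERDICT (by name: the statement is the Claim_ definition above) =====
theorem calculate_3renpuku_formation_points_spec : Claim_equal_calculate_3renpuku_formation_points := by
  intro line1 line2 line3 _
  unfold Spec_calculate_3renpuku_formation_points
  show ((PySem.Set.ofList (pvCombA line1 line2 line3)).length : Int) =
    pvOut (PySem.Set.ofList line1) (PySem.Set.ofList line2) (PySem.Set.ofList line3)
      (PySem.List.sorted
        (PySem.Set.union (PySem.Set.union (PySem.Set.ofList line1) (PySem.Set.ofList line2))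
          (PySem.Set.ofList line3)) (fun v => v) false) 0
  rw [pvOut_eq, zero_add]
  set u := PySem.List.sorted
      (PySem.Set.union (PySem.Set.union (PySem.Set.ofList line1) (PySem.Set.ofList line2))
        (PySem.Set.ofList line3)) (fun v => v) false with hu
  have hu_mem : ∀ v : Int, v ∈ u ↔ (v ∈ line1 ∨ v ∈ line2 ∨ v ∈ line3) := by
    intro v
    rw [hu]
    simp [PySem.List.mem_sorted, PySem.Set.mem_union, PySem.Set.mem_ofList, or_assoc]
  have hu_lt : u.Pairwise (· < ·) := by
    rw [hu]
    exact pvSorted_lt _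
      (PySem.Set.nodup_union _ _ (PySem.Set.nodup_union _ _ (PySem.Set.nodup_ofList _)))
  have hkey := pvKey_iff line1 line2 line3 u hu_mem hu_lt
  have hginj : Function.Injective (fun t : Int × Int × Int => [t.1, t.2.1, t.2.2]) := by
    rintro ⟨a1, a2, a3⟩ ⟨b1, b2, b3⟩ h
    simp only [List.cons.injEq, and_true] at h
    simp [h.1, h.2.1, h.2.2]
  have hTBnodup : ((pvTriplesL u).filter
      (fun t => pvFeas (PySem.Set.ofList line1) (PySem.Set.ofList line2) (PySem.Set.ofList line3)
        t.1 t.2.1 t.2.2)).Nodup := (nodup_pvTriplesL hu_lt).filter _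
  have hmapnodup := hTBnodup.map hginj
  have hmems : ∀ L : List Int,
      L ∈ PySem.Set.ofList (pvCombA line1 line2 line3) ↔
      L ∈ ((pvTriplesL u).filter
        (fun t => pvFeas (PySem.Set.ofList line1) (PySem.Set.ofList line2) (PySem.Set.ofList line3)
          t.1 t.2.1 t.2.2)).map (fun t => [t.1, t.2.1, t.2.2]) := by
    intro L
    rw [PySem.Set.mem_ofList, hkey L]
    simp only [List.mem_map, List.mem_filter]
    constructor
    · rintro ⟨t, ht, hf, he⟩
      exact ⟨t, ⟨ht, hf⟩, he⟩
    · rintro ⟨t, ⟨ht, hf⟩, he⟩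
      exact ⟨t, ht, hf, he⟩
  have hperm := (List.perm_ext_iff_of_nodup (PySem.Set.nodup_ofList _) hmapnodup).mpr hmems
  have hlen : (PySem.Set.ofList (pvCombA line1 line2 line3)).length =
      (pvTriplesL u).countP
        (fun t => pvFeas (PySem.Set.ofList line1) (PySem.Set.ofList line2) (PySem.Set.ofList line3)
          t.1 t.2.1 t.2.2) := by
    rw [List.countP_eq_length_filter, hperm.length_eq, List.length_map]
  exact_mod_cast hlen
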